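-- pv_equiv track=rewrite | github.com/GarinaPrasai/DataPipeline | data_processing/dedupe.py | dedupe_hosts
-- ===== SOURCE A (Python) =====
-- from typing import List, Dict
--
-- def dedupe_hosts(hosts: List[Dict]) -> List[Dict]:
--     seen = {}
--     for host in hosts:
--         host_id = host["host_id"]
--         if host_id not in seen:
--             seen[host_id] = host
--         else:
--             # Merge hosts with the same ID (e.g., taking the latest data)
--             seen[host_id].update(host)
--     return list(seen.values())
-- ===== SOURCE B (Python) =====
-- from typing import List, Dict
--
-- def _merge(group):
--     merged = group[0]
--     for h in group[1:]:
--         merged.update(h)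
--     return merged
--
-- def dedupe_hosts(hosts: List[Dict]) -> List[Dict]:
--     groups = {}
--     for host in hosts:
--         groups.setdefault(host["host_id"], []).append(host)
--     return [_merge(g) for g in groups.values()]
-- ===== Notes on version B (the rewrite author's own statement) =====
-- stated objective: alternative
-- what changed: B replaces A's single merge-as-you-go pass over one dict of merged hosts by a group-then-merge decomposition: a first pass builds an ordered index host_id -> list of all hosts with that id, and a second pass folds each group left-to-right with dict.update (mutating the group's first dict, like A).
import Mathlib
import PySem

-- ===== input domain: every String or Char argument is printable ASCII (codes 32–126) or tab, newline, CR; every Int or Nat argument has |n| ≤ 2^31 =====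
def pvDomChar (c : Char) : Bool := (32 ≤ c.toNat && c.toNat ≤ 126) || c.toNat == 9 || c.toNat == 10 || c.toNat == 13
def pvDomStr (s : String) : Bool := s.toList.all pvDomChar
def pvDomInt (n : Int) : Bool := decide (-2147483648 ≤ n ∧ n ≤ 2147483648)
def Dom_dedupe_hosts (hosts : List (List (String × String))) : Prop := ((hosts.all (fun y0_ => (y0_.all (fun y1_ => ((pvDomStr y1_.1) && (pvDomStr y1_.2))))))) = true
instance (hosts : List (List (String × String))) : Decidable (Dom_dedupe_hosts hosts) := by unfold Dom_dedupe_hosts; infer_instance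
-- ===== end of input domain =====

-- B replaces A's merge-as-you-go pass by a group-then-merge decomposition (objective: alternative,
-- same cost). Both A and B mutate the first dict of each id-group in place via dict.update; the
-- equivalence proved here is about the RETURN value only.

-- ===== PORT A =====
-- A: one pass; seen maps host_id to the already-merged dict, merged on the fly with dict.update.
def dedupe_hosts (hosts : List (List (String × String))) : List (List (String × String)) :=
  (hosts.foldl (fun (seen : PySem.Dict String (List (String × String))) host =>
    match (PySem.Dict.mk host).get? "host_id" with
    | none => seen   -- Python raises KeyError here; excluded by Pre_
    | some host_id =>
      if seen.contains host_id = false then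
        seen.insert host_id host
      else
        seen.insert host_id (((PySem.Dict.mk (seen.getD host_id [])).update host).items))
    PySem.Dict.empty).values

-- ===== PORT B =====
-- B helper _merge: merged = group[0]; for h in group[1:]: merged.update(h)
def pvMerge (group : List (List (String × String))) : List (String × String) :=
  match group with
  | [] => []   -- group[0]: IndexError in Python; unreachable, groups' values are nonempty
  | first :: rest => rest.foldl (fun merged h => ((PySem.Dict.mk merged).update h).items) first

-- B: pass 1 groups hosts by id (setdefault+append = Dict.modify); pass 2 merges each group.
def dedupe_hosts_alt (hosts : List (List (String × String))) : List (List (String × String)) :=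
  ((hosts.foldl (fun (groups : PySem.Dict String (List (List (String × String)))) host =>
    match (PySem.Dict.mk host).get? "host_id" with
    | none => groups   -- Python raises KeyError here; excluded by Pre_
    | some hid => groups.modify hid [] (· ++ [host]))
    PySem.Dict.empty).values).map pvMerge

-- ===== PRECONDITION & SPEC =====
-- Pre_ excludes exactly the inputs where Python A raises KeyError: a host dict without "host_id".
def Pre_dedupe_hosts (hosts : List (List (String × String))) : Prop :=
  (hosts.all (fun host => host.any (fun p => p.1 == "host_id"))) = true
instance (hosts : List (List (String × String))) : Decidable (Pre_dedupe_hosts hosts) := by unfold Pre_dedupe_hosts; infer_instance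

def pvWitness_dedupe_hosts : (List (List (String × String))) :=
  [[("host_id", "a"), ("x", "1")], [("host_id", "a"), ("y", "2")], [("host_id", "b")]]

def Spec_dedupe_hosts (hosts : List (List (String × String))) (out : List (List (String × String))) : Prop := out = dedupe_hosts_alt hosts
instance (hosts : List (List (String × String))) (out : List (List (String × String))) : Decidable (Spec_dedupe_hosts hosts out) := by unfold Spec_dedupe_hosts; infer_instance

-- ===== CLAIM (what is proved, stated in full; the proofs are below) =====
def Claim_equal_dedupe_hosts : Prop := ∀ (hosts : List (List (String × String))), Dom_dedupe_hosts hosts → Pre_dedupe_hosts hosts → Spec_dedupe_hosts hosts (dedupe_hosts hosts)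

-- ===== LEMMAS AND PROOFS =====

-- One update step on a raw host dict.
def pvUpd (m h : List (String × String)) : List (String × String) := ((PySem.Dict.mk m).update h).items

-- Value-wise merging of B's group index yields A's merged index.
def pvMapV (d : PySem.Dict String (List (List (String × String)))) : PySem.Dict String (List (String × String)) :=
  PySem.Dict.mk (d.items.map (fun p => (p.1, pvMerge p.2)))

theorem pvMapV_contains (d : PySem.Dict String (List (List (String × String)))) (k : String) :
    (pvMapV d).contains k = d.contains k := by
  simp [pvMapV, PySem.Dict.contains, List.any_map, Function.comp_def]

theorem pvMapV_get? (d : PySem.Dict String (List (List (String × String)))) (k : String) :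
    (pvMapV d).get? k = (d.get? k).map pvMerge := by
  simp only [pvMapV, PySem.Dict.get?, List.find?_map, Function.comp_def]
  cases List.find? (fun p => p.1 == k) d.items <;> simp

theorem pvMerge_append (g : List (List (String × String))) (h : List (String × String))
    (hg : g ≠ []) : pvMerge (g ++ [h]) = pvUpd (pvMerge g) h := by
  cases g with
  | nil => exact absurd rfl hg
  | cons f r => simp [pvMerge, pvUpd, List.foldl_append]

theorem pv_step_comm (d : PySem.Dict String (List (List (String × String))))
    (host : List (String × String))
    (hInv : ∀ p ∈ d.items, p.2 ≠ []) :
    (match (PySem.Dict.mk host).get? "host_id" with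
     | none => pvMapV d
     | some host_id =>
       if (pvMapV d).contains host_id = false then
         (pvMapV d).insert host_id host
       else
         (pvMapV d).insert host_id (((PySem.Dict.mk ((pvMapV d).getD host_id [])).update host).items))
    = pvMapV (match (PySem.Dict.mk host).get? "host_id" with
              | none => d
              | some hid => d.modify hid [] (· ++ [host])) := by
  cases hh : (PySem.Dict.mk host).get? "host_id" with
  | none => rfl
  | some hid =>
    simp only
    by_cases hc : d.contains hid = true
    · -- key already present: A updates the stored merged dict, B appends to the group list
      obtain ⟨g, hg⟩ : ∃ g, d.get? hid = some g := by
        rcases hq : d.get? hid with _ | g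
        · rw [PySem.Dict.contains_eq_isSome_get?, hq] at hc; simp at hc
        · exact ⟨g, rfl⟩
      have hgne : g ≠ [] := hInv (hid, g) (PySem.Dict.mem_items_of_get?_eq_some d hg)
      have hcm : (pvMapV d).contains hid = true := by rw [pvMapV_contains]; exact hc
      rw [hcm]
      simp only [Bool.true_eq_false, if_false]
      have hgd : (pvMapV d).getD hid [] = pvMerge g := by
        simp [PySem.Dict.getD, pvMapV_get?, hg]
      have hgd' : d.getD hid [] = g := by simp [PySem.Dict.getD, hg]
      rw [hgd]
      apply PySem.Dict.ext
      rw [PySem.Dict.items_insert_of_contains _ _ hcm]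
      simp only [PySem.Dict.modify, hgd']
      have hitems := PySem.Dict.items_insert_of_contains d (g ++ [host]) hc
      simp only [pvMapV, hitems, List.map_map]
      congr 1
      funext p
      by_cases hp : p.1 = hid
      · simp [hp, pvMerge_append g host hgne, pvUpd]
      · simp [hp]
    · -- fresh key: A stores the host, B opens a singleton group
      have hc' : d.contains hid = false := by revert hc; cases d.contains hid <;> simp
      have hcm : (pvMapV d).contains hid = false := by rw [pvMapV_contains]; exact hc'
      rw [hcm]
      simp only [if_pos]
      have hgd' : d.getD hid [] = [] := PySem.Dict.getD_of_not_contains d [] hc'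
      apply PySem.Dict.ext
      rw [PySem.Dict.items_insert_of_not_contains _ _ hcm]
      simp only [PySem.Dict.modify, hgd', List.nil_append]
      have hitems := PySem.Dict.items_insert_of_not_contains d [host] hc'
      simp [pvMapV, hitems, pvMerge]

theorem pv_inv_step (d : PySem.Dict String (List (List (String × String))))
    (host : List (String × String))
    (hInv : ∀ p ∈ d.items, p.2 ≠ []) :
    ∀ p ∈ (match (PySem.Dict.mk host).get? "host_id" with
           | none => d
           | some hid => d.modify hid [] (· ++ [host])).items, p.2 ≠ [] := by
  cases hh : (PySem.Dict.mk host).get? "host_id" with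
  | none => exact hInv
  | some hid =>
    simp only [PySem.Dict.modify, PySem.Dict.insert]
    by_cases hc : d.contains hid = true <;> simp only [hc, if_pos, Bool.false_eq_true, if_false]
    · intro p hp
      rcases List.mem_map.mp hp with ⟨q, hq, hpq⟩
      by_cases hq1 : (q.1 == hid) = true
      · simp only [hq1, if_pos] at hpq
        subst hpq; simp
      · simp only [hq1] at hpq
        subst hpq; exact hInv q hq
    · intro p hp
      rcases List.mem_append.mp hp with h1 | h1
      · exact hInv p h1
      · simp at h1; subst h1; simp

theorem pv_fold_comm (hosts : List (List (String × String)))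
    (d : PySem.Dict String (List (List (String × String))))
    (hInv : ∀ p ∈ d.items, p.2 ≠ []) :
    hosts.foldl (fun seen host =>
      match (PySem.Dict.mk host).get? "host_id" with
      | none => seen
      | some host_id =>
        if seen.contains host_id = false then
          seen.insert host_id host
        else
          seen.insert host_id (((PySem.Dict.mk (seen.getD host_id [])).update host).items)) (pvMapV d)
    = pvMapV (hosts.foldl (fun groups host =>
        match (PySem.Dict.mk host).get? "host_id" with
        | none => groups
        | some hid => groups.modify hid [] (· ++ [host])) d) := by
  induction hosts generalizing d with
  | nil => rfl
  | cons host rest ih =>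
    simp only [List.foldl_cons]
    rw [pv_step_comm d host hInv]
    exact ih _ (pv_inv_step d host hInv)

-- ===== VERDICT (by name: the statement is the Claim_ definition above) =====
theorem dedupe_hosts_spec : Claim_equal_dedupe_hosts := by
  intro hosts _ _
  unfold Spec_dedupe_hosts dedupe_hosts dedupe_hosts_alt
  have hempty : (PySem.Dict.empty : PySem.Dict String (List (String × String))) =
      pvMapV PySem.Dict.empty := by
    apply PySem.Dict.ext; simp [pvMapV, PySem.Dict.empty]
  rw [hempty, pv_fold_comm hosts PySem.Dict.empty (by simp [PySem.Dict.empty])]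
  simp [pvMapV, PySem.Dict.values, List.map_map, Function.comp]
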